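-- pv_equiv track=rewrite | github.com/yangwei-lim/Device_Generator | Pattern.py | sorted_1d_interdigitated_pattern
-- ===== SOURCE A (Python) =====
-- import operator
--
-- def sorted_1d_interdigitated_pattern(inst: list) -> list:
--     """
--     @brief: sorted 1D interdigitated pattern
--     @param: inst -> instance list (e.g. [1, 2, 3]: one 0, two 1, three 2)
--     @return: pattern -> pattern list (e.g. [2, 1, 0, 2, 1, 2])
--     """
--     pattern = []
--
--     # convert the instances number to a dictionary
--     counts = dict(enumerate(inst))
--
--     # sort the dictionary by the value
--     counts = dict(sorted(counts.items(), key=operator.itemgetter(1), reverse=True))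
--
--     # find the maximum count
--     max_count = max(inst)
--
--     # create the interdigitated pattern
--     # loop through the maximum count
--     for _ in range(max_count):
--
--          # loop through the instance
--         for num in counts:
--
--             # check the instance count
--             if counts[num] > 0:
--                 pattern.append(num)
--                 counts[num] -= 1
--
--     return pattern
-- ===== SOURCE B (Python) =====
-- def sorted_1d_interdigitated_pattern(inst: list) -> list:
--     # sort the indices once, by descending count (stable, so ties keep index order)
--     order = sorted(range(len(inst)), key=lambda i: -inst[i])
--     pattern = []
--     k = len(order)
--     for r in range(max(inst)):
--         # entries whose count is exhausted sit at the tail of `order`: shrink the pointer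
--         while k > 0 and inst[order[k - 1]] <= r:
--             k -= 1
--         pattern.extend(order[:k])
--     return pattern
-- ===== Notes on version B (the rewrite author's own statement) =====
-- stated objective: faster
-- what changed: A rebuilds the pattern by scanning a value-sorted dict of all n indices in every one of max(inst) rounds, decrementing counts; B sorts the index list once by descending count and per round emits the prefix of still-active indices via a pointer that only ever shrinks, so exhausted entries are never rescanned.
import Mathlib
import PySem

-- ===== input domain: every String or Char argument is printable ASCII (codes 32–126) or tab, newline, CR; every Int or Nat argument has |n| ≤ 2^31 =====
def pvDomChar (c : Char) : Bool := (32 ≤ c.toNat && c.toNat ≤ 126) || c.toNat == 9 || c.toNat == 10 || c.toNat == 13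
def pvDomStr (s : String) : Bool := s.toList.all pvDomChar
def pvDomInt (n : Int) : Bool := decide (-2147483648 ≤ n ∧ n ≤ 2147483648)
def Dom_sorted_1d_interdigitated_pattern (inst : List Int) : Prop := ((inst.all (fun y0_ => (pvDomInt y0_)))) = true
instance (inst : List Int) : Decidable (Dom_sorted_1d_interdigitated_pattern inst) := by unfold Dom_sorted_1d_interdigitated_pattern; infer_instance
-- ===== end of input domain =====

-- B sorts the index list once and emits, per round, the prefix of still-active indices via a
-- shrinking pointer, instead of A's per-round scan of a sorted dict with decrements (objective: faster).


-- ===== PORT A =====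
def sorted_1d_interdigitated_pattern (inst : List Int) : List Int :=
  -- counts = dict(enumerate(inst)); counts = dict(sorted(counts.items(), key=itemgetter(1), reverse=True))
  let counts0 : PySem.Dict Int Int := PySem.Dict.ofList (PySem.List.enumerate inst)
  let counts : PySem.Dict Int Int :=
    PySem.Dict.ofList (PySem.List.sorted counts0.items (fun p => p.2) true)
  -- max_count = max(inst)  (ValueError on empty list: excluded by Pre_)
  match PySem.List.max? inst (fun x => x) with
  | none => []
  | some maxCount =>
      -- for _ in range(max_count): for num in counts: if counts[num] > 0: append; counts[num] -= 1
      ((PySem.List.pyRange 0 maxCount 1).foldl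
        (fun st _ =>
          st.2.keys.foldl
            (fun st num =>
              if st.2.getD num 0 > 0 then
                (st.1 ++ [num], st.2.insert num (st.2.getD num 0 - 1))
              else st)
            st)
        ([], counts)).1

-- ===== PORT B =====
-- while k > 0 and inst[order[k-1]] <= r: k -= 1
def pvShrink (inst order : List Int) (r : Int) : Nat → Nat
  | 0 => 0
  | k + 1 =>
      if PySem.List.pyGetD inst (PySem.List.pyGetD order ((k : Nat) : Int) 0) 0 ≤ r then
        pvShrink inst order r k
      else k + 1

def sorted_1d_interdigitated_pattern_alt (inst : List Int) : List Int :=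
  -- order = sorted(range(len(inst)), key=lambda i: -inst[i])
  let order := PySem.List.sorted (PySem.List.pyRange 0 (inst.length : Int) 1)
    (fun i => -(PySem.List.pyGetD inst i 0)) false
  -- max(inst): ValueError on empty list (excluded by Pre_)
  match PySem.List.max? inst (fun x => x) with
  | none => []
  | some m =>
      ((PySem.List.pyRange 0 m 1).foldl
        (fun (st : List Int × Nat) r =>
          let k := pvShrink inst order r st.2
          (st.1 ++ order.take k, k))
        ([], order.length)).1

-- ===== PRECONDITION & SPEC =====
-- Pre_ excludes only the empty list, on which Python's max(inst) raises ValueError.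
def Pre_sorted_1d_interdigitated_pattern (inst : List Int) : Prop := inst ≠ []
instance (inst : List Int) : Decidable (Pre_sorted_1d_interdigitated_pattern inst) := by unfold Pre_sorted_1d_interdigitated_pattern; infer_instance
def pvWitness_sorted_1d_interdigitated_pattern : List Int := [1, 3, 2]

def Spec_sorted_1d_interdigitated_pattern (inst : List Int) (out : List Int) : Prop := out = sorted_1d_interdigitated_pattern_alt inst
instance (inst : List Int) (out : List Int) : Decidable (Spec_sorted_1d_interdigitated_pattern inst out) := by unfold Spec_sorted_1d_interdigitated_pattern; infer_instance

-- ===== CLAIM (what is proved, stated in full; the proofs are below) =====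
def Claim_equal_sorted_1d_interdigitated_pattern : Prop := ∀ (inst : List Int), Dom_sorted_1d_interdigitated_pattern inst → Pre_sorted_1d_interdigitated_pattern inst → Spec_sorted_1d_interdigitated_pattern inst (sorted_1d_interdigitated_pattern inst)

-- ===== LEMMAS AND PROOFS =====

def pvGet (inst : List Int) (i : Int) : Int := PySem.List.pyGetD inst i 0

def pvOrd (inst : List Int) : List Int :=
  PySem.List.sorted (PySem.List.pyRange 0 (inst.length : Int) 1)
    (fun i => -(PySem.List.pyGetD inst i 0)) false

-- the canonical value: per round r, the still-active indices in descending-count order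
def pvC (inst : List Int) (m : Int) : List Int :=
  (PySem.List.pyRange 0 m 1).foldl
    (fun acc r => acc ++ (pvOrd inst).filter (fun i => decide (r < pvGet inst i))) []

-- A's dict value at key i after t rounds
def pvV (inst : List Int) (t : Nat) (i : Int) : Int :=
  if 0 < pvGet inst i then max (pvGet inst i - t) 0 else pvGet inst i

-- A's initial dict
def pvCounts (inst : List Int) : PySem.Dict Int Int :=
  PySem.Dict.ofList (PySem.List.sorted
    (PySem.Dict.ofList (PySem.List.enumerate inst)).items (fun p => p.2) true)

lemma pvRange_nil {a b : Int} (h : b ≤ a) : PySem.List.pyRange a b 1 = [] := by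
  apply List.eq_nil_iff_forall_not_mem.mpr
  intro x hx
  rw [PySem.List.mem_pyRange_one] at hx
  omega

lemma pvRange_nodup (a b : Int) : (PySem.List.pyRange a b 1).Nodup := by
  unfold PySem.List.pyRange
  simp only [if_neg (by norm_num : (1:Int) ≠ 0)]
  apply List.Nodup.map
  · intro x y hxy
    simp only at hxy
    omega
  · exact List.nodup_range

lemma pvGetD_cons_succ (x : Int) (t : List Int) {j : Int} (hj : 0 ≤ j) :
    PySem.List.pyGetD (x :: t) (j + 1) 0 = PySem.List.pyGetD t j 0 := by
  rw [PySem.List.pyGetD_of_nonneg _ _ (by omega), PySem.List.pyGetD_of_nonneg _ _ hj]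
  rw [show (j + 1).toNat = j.toNat + 1 by omega]
  simp

lemma pvEnum_eq (inst : List Int) : ∀ s : Int,
    PySem.List.enumerate inst s =
      (PySem.List.pyRange s (s + inst.length) 1).map
        (fun i => (i, PySem.List.pyGetD inst (i - s) 0)) := by
  induction inst with
  | nil => intro s; simp [PySem.List.enumerate, pvRange_nil (le_refl s)]
  | cons x t ih =>
      intro s
      rw [show (s + ((x :: t).length : Int)) = (s + (t.length : Int)) + 1 by rw [List.length_cons]; push_cast; ring]
      rw [PySem.List.pyRange_one_cons (by have := t.length.cast_nonneg (α := Int); omega)]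
      simp only [List.map_cons]
      rw [show PySem.List.enumerate (x :: t) s = (s, x) :: PySem.List.enumerate t (s + 1) from rfl]
      congr 1
      · simp
      · rw [ih (s + 1)]
        rw [show s + (t.length : Int) + 1 = (s + 1) + (t.length : Int) by ring]
        apply List.map_congr_left
        intro i hi
        rw [PySem.List.mem_pyRange_one] at hi
        rw [show i - s = (i - (s + 1)) + 1 by ring, pvGetD_cons_succ x t (by omega)]

lemma pvInsertBy_map {α β : Type} (f : α → β) (bb : β → β → Bool) (ba : α → α → Bool)
    (h : ∀ x y, bb (f x) (f y) = ba x y) (x : α) :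
    ∀ ys : List α, PySem.List.insertBy bb (f x) (ys.map f) = (PySem.List.insertBy ba x ys).map f := by
  intro ys
  induction ys with
  | nil => simp [PySem.List.insertBy]
  | cons y t ih =>
      simp only [List.map_cons, PySem.List.insertBy, h x y]
      by_cases hb : ba x y = true
      · simp [hb]
      · simp only [Bool.not_eq_true] at hb
        simp [hb, ih]

lemma pvSortFold_map {α β : Type} (f : α → β) (bb : β → β → Bool) (ba : α → α → Bool)
    (h : ∀ x y, bb (f x) (f y) = ba x y) :
    ∀ (l ys : List α),
      (l.map f).foldl (fun acc x => PySem.List.insertBy bb x acc) (ys.map f) =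
        (l.foldl (fun acc x => PySem.List.insertBy ba x acc) ys).map f := by
  intro l
  induction l with
  | nil => intro ys; simp
  | cons a t ih =>
      intro ys
      simp only [List.map_cons, List.foldl_cons]
      rw [pvInsertBy_map f bb ba h a ys]
      exact ih _

lemma pvEnum_zero (inst : List Int) :
    PySem.List.enumerate inst =
      (PySem.List.pyRange 0 (inst.length : Int) 1).map (fun i => (i, pvGet inst i)) := by
  rw [pvEnum_eq inst 0]
  simp only [zero_add, sub_zero]
  rfl

lemma pvPairs_eq (inst : List Int) :
    PySem.List.sorted (PySem.List.enumerate inst) (fun p => p.2) true =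
      (pvOrd inst).map (fun i => (i, pvGet inst i)) := by
  rw [pvEnum_zero]
  rw [PySem.List.sorted_rev_eq_foldl_insertBy]
  rw [show pvOrd inst = PySem.List.sorted (PySem.List.pyRange 0 (inst.length : Int) 1)
        (fun i => -(PySem.List.pyGetD inst i 0)) false from rfl]
  rw [PySem.List.sorted_eq_foldl_insertBy]
  have hmap := pvSortFold_map (fun i : Int => (i, pvGet inst i))
      (fun a b : Int × Int => decide (b.2 < a.2))
      (fun x y : Int => decide (pvGet inst y < pvGet inst x))
      (fun x y => by simp) (PySem.List.pyRange 0 (inst.length : Int) 1) []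
  simp only [List.map_nil] at hmap
  rw [hmap]
  congr 1
  apply PySem.List.foldl_congr_mem
  intro acc x _
  congr 1
  funext a b
  simp [pvGet]

lemma pvOrd_nodup (inst : List Int) : (pvOrd inst).Nodup :=
  ((PySem.List.sorted_perm _ _ _).nodup_iff).mpr (pvRange_nodup _ _)

lemma pvOrd_desc (inst : List Int) :
    (pvOrd inst).Pairwise (fun a b => pvGet inst b ≤ pvGet inst a) := by
  have := PySem.List.sorted_pairwise (PySem.List.pyRange 0 (inst.length : Int) 1)
    (fun i => -(PySem.List.pyGetD inst i 0))
  exact this.imp (fun h => by simpa [pvGet] using h)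

lemma pvOfList_items (ps : List (Int × Int)) (h : (ps.map (fun p => p.1)).Nodup) :
    (PySem.Dict.ofList ps).items = ps := by
  show (PySem.Dict.empty.update ps).items = ps
  unfold PySem.Dict.update
  have := PySem.Dict.items_foldl_insert_fresh ps (fun p => p.1) (fun p => p.2)
    PySem.Dict.empty (by intro a _; simp) h
  simpa using this

lemma pvCounts0_items (inst : List Int) :
    (PySem.Dict.ofList (PySem.List.enumerate inst)).items = PySem.List.enumerate inst := by
  apply pvOfList_items
  rw [pvEnum_zero]
  simp only [List.map_map]
  have : ((fun p : Int × Int => p.1) ∘ fun i : Int => (i, pvGet inst i)) = id := by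
    funext i; rfl
  rw [this, List.map_id]
  exact pvRange_nodup _ _

lemma pvCounts_items (inst : List Int) :
    (pvCounts inst).items = (pvOrd inst).map (fun i => (i, pvGet inst i)) := by
  unfold pvCounts
  rw [pvCounts0_items, pvPairs_eq]
  apply pvOfList_items
  simp only [List.map_map]
  have : ((fun p : Int × Int => p.1) ∘ fun i : Int => (i, pvGet inst i)) = id := by
    funext i; rfl
  rw [this, List.map_id]
  exact pvOrd_nodup inst

lemma pvCounts_keys (inst : List Int) : (pvCounts inst).keys = pvOrd inst := by
  show (pvCounts inst).items.map _ = _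
  rw [pvCounts_items]
  simp only [List.map_map]
  have : ((fun p : Int × Int => p.1) ∘ fun i : Int => (i, pvGet inst i)) = id := by
    funext i; rfl
  rw [this, List.map_id]

lemma pvCounts_getD (inst : List Int) {i : Int} (h : i ∈ pvOrd inst) :
    (pvCounts inst).getD i 0 = pvGet inst i := by
  apply PySem.Dict.getD_of_mem_items
  · rw [pvCounts_items]
    exact List.mem_map.mpr ⟨i, h, rfl⟩
  · rw [pvCounts_keys]; exact pvOrd_nodup inst

lemma pvInnerA (l : List Int) : ∀ (d : PySem.Dict Int Int) (pat : List Int),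
    l.Nodup → (∀ i ∈ l, d.contains i = true) →
    (l.foldl (fun st num =>
        if st.2.getD num 0 > 0 then
          (st.1 ++ [num], st.2.insert num (st.2.getD num 0 - 1))
        else st) (pat, d)).1
      = pat ++ l.filter (fun i => decide (0 < d.getD i 0)) ∧
    (l.foldl (fun st num =>
        if st.2.getD num 0 > 0 then
          (st.1 ++ [num], st.2.insert num (st.2.getD num 0 - 1))
        else st) (pat, d)).2.keys = d.keys ∧
    ∀ j : Int, (l.foldl (fun st num =>
        if st.2.getD num 0 > 0 then
          (st.1 ++ [num], st.2.insert num (st.2.getD num 0 - 1))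
        else st) (pat, d)).2.getD j 0
      = if j ∈ l ∧ 0 < d.getD j 0 then d.getD j 0 - 1 else d.getD j 0 := by
  induction l with
  | nil => intro d pat _ _; simp
  | cons x t ih =>
      intro d pat hnd hc
      have hxt : x ∉ t := (List.nodup_cons.mp hnd).1
      have hnt : t.Nodup := (List.nodup_cons.mp hnd).2
      have hcx : d.contains x = true := hc x (List.mem_cons_self)
      simp only [List.foldl_cons]
      by_cases hx : 0 < d.getD x 0
      · rw [if_pos (by exact hx)]
        have hct : ∀ i ∈ t, (d.insert x (d.getD x 0 - 1)).contains i = true := by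
          intro i hi
          rw [PySem.Dict.contains_insert]
          simp [hc i (List.mem_cons_of_mem _ hi)]
        obtain ⟨h1, h2, h3⟩ := ih (d.insert x (d.getD x 0 - 1)) (pat ++ [x]) hnt hct
        refine ⟨?_, ?_, ?_⟩
        · rw [h1, List.filter_cons_of_pos (by simpa using hx)]
          have hf : List.filter (fun i => decide (0 < (d.insert x (d.getD x 0 - 1)).getD i 0)) t
              = List.filter (fun i => decide (0 < d.getD i 0)) t := by
            apply List.filter_congr
            intro i hi
            have hne : i ≠ x := fun he => hxt (he ▸ hi)
            rw [PySem.Dict.getD_insert_of_ne d _ _ hne]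
          rw [hf]
          simp
        · rw [h2, PySem.Dict.keys_insert_of_contains d _ hcx]
        · intro j
          rw [h3 j]
          by_cases hjx : j = x
          · subst hjx
            rw [PySem.Dict.getD_insert_self]
            have hjt : j ∉ t := hxt
            simp [hjt, hx]
          · rw [PySem.Dict.getD_insert_of_ne d _ _ hjx]
            simp [hjx]
      · rw [if_neg (by exact hx)]
        obtain ⟨h1, h2, h3⟩ := ih d pat hnt (fun i hi => hc i (List.mem_cons_of_mem _ hi))
        refine ⟨?_, ?_, ?_⟩
        · rw [h1, List.filter_cons_of_neg (by simpa using hx)]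
        · exact h2
        · intro j
          rw [h3 j]
          by_cases hjx : j = x
          · subst hjx; simp [hx]
          · simp [hjx]

lemma pvC_zero (inst : List Int) {m : Int} (hm : m ≤ 0) : pvC inst m = [] := by
  unfold pvC; rw [pvRange_nil hm]; rfl

lemma pvC_succ (inst : List Int) (m : Int) (hm : 0 ≤ m) :
    pvC inst (m + 1) = pvC inst m ++ (pvOrd inst).filter (fun i => decide (m < pvGet inst i)) := by
  unfold pvC
  rw [PySem.List.pyRange_one_succ_right hm, List.foldl_append]
  rfl

lemma pvOuterA (inst : List Int) : ∀ t : Nat,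
    ((PySem.List.pyRange 0 (t : Int) 1).foldl
      (fun st _ =>
        st.2.keys.foldl
          (fun st num =>
            if st.2.getD num 0 > 0 then
              (st.1 ++ [num], st.2.insert num (st.2.getD num 0 - 1))
            else st)
          st)
      ([], pvCounts inst)).1 = pvC inst t ∧
    ((PySem.List.pyRange 0 (t : Int) 1).foldl
      (fun st _ =>
        st.2.keys.foldl
          (fun st num =>
            if st.2.getD num 0 > 0 then
              (st.1 ++ [num], st.2.insert num (st.2.getD num 0 - 1))
            else st)
          st)
      ([], pvCounts inst)).2.keys = pvOrd inst ∧
    ∀ j ∈ pvOrd inst,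
      ((PySem.List.pyRange 0 (t : Int) 1).foldl
        (fun st _ =>
          st.2.keys.foldl
            (fun st num =>
              if st.2.getD num 0 > 0 then
                (st.1 ++ [num], st.2.insert num (st.2.getD num 0 - 1))
              else st)
            st)
        ([], pvCounts inst)).2.getD j 0 = pvV inst t j := by
  intro t
  induction t with
  | zero =>
      rw [show ((0 : Nat) : Int) = 0 from rfl, pvRange_nil (le_refl 0)]
      refine ⟨by simpa using (pvC_zero inst (le_refl 0)).symm, pvCounts_keys inst, ?_⟩
      intro j hj
      rw [List.foldl_nil]
      show (pvCounts inst).getD j 0 = pvV inst 0 j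
      rw [pvCounts_getD inst hj]
      unfold pvV
      split_ifs <;> omega
  | succ t ih =>
      obtain ⟨ih1, ih2, ih3⟩ := ih
      rw [show ((t + 1 : Nat) : Int) = (t : Int) + 1 by push_cast; ring]
      rw [PySem.List.pyRange_one_succ_right (by positivity), List.foldl_append, List.foldl_cons,
        List.foldl_nil]
      set S := ((PySem.List.pyRange 0 (t : Int) 1).foldl
        (fun st _ =>
          st.2.keys.foldl
            (fun st num =>
              if st.2.getD num 0 > 0 then
                (st.1 ++ [num], st.2.insert num (st.2.getD num 0 - 1))
              else st)
            st)
        ([], pvCounts inst)) with hS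
      have hnd : S.2.keys.Nodup := by rw [ih2]; exact pvOrd_nodup inst
      have hct : ∀ i ∈ S.2.keys, S.2.contains i = true := by
        intro i hi; exact (PySem.Dict.contains_iff_mem_keys _ _).mpr hi
      obtain ⟨h1, h2, h3⟩ := pvInnerA S.2.keys S.2 S.1 hnd hct
      rw [show S = (S.1, S.2) from rfl]
      refine ⟨?_, ?_, ?_⟩
      · rw [h1, ih1, ih2]
        rw [pvC_succ inst (t : Int) (by positivity)]
        congr 1
        apply List.filter_congr
        intro i hi
        rw [ih3 i hi]
        rw [decide_eq_decide]
        unfold pvV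
        split_ifs <;> omega
      · rw [h2, ih2]
      · intro j hj
        rw [h3 j, ih2, ih3 j hj]
        have hiff : (j ∈ pvOrd inst ∧ 0 < pvV inst t j) ↔ (0 < pvV inst t j) :=
          ⟨fun h => h.2, fun h => ⟨hj, h⟩⟩
        rw [if_congr hiff rfl rfl]
        unfold pvV
        push_cast
        split_ifs <;> omega

lemma pvA_eq_C (inst : List Int) (m : Int)
    (hm : PySem.List.max? inst (fun x => x) = some m) :
    sorted_1d_interdigitated_pattern inst = pvC inst m := by
  unfold sorted_1d_interdigitated_pattern
  rw [hm]
  show ((PySem.List.pyRange 0 m 1).foldl _ ([], pvCounts inst)).1 = pvC inst m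
  by_cases h0 : 0 ≤ m
  · have := (pvOuterA inst m.toNat).1
    rwa [Int.toNat_of_nonneg h0] at this
  · rw [pvRange_nil (by omega), List.foldl_nil, pvC_zero inst (by omega)]

def pvK (inst : List Int) : Nat → Nat
  | 0 => (pvOrd inst).length
  | (t + 1) => (pvOrd inst).countP (fun i => decide ((t : Int) < pvGet inst i))

lemma pvDescPrefix (inst : List Int) (p : Int → Bool)
    (hdc : ∀ a b : Int, pvGet inst b ≤ pvGet inst a → p b = true → p a = true) :
    ∀ l : List Int, l.Pairwise (fun a b => pvGet inst b ≤ pvGet inst a) →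
      (l.filter p = l.take (l.countP p) ∧
       ∀ j : Nat, (hj : j < l.length) → (p l[j] = true ↔ j < l.countP p)) := by
  intro l
  induction l with
  | nil => intro _; exact ⟨rfl, fun j hj => by simp at hj⟩
  | cons x t ih =>
      intro hpw
      obtain ⟨hx, ht⟩ := List.pairwise_cons.mp hpw
      obtain ⟨ih1, ih2⟩ := ih ht
      by_cases hpx : p x = true
      · refine ⟨?_, ?_⟩
        · rw [List.filter_cons_of_pos hpx, List.countP_cons_of_pos hpx]
          rw [List.take_succ_cons, ih1]
        · intro j hj
          cases j with
          | zero => simp [hpx]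
          | succ j =>
              rw [List.countP_cons_of_pos hpx]
              simpa using (ih2 j (by simpa using hj)).trans (by omega)
      · have hall : ∀ y ∈ t, ¬ p y = true := by
          intro y hy hpy
          exact hpx (hdc x y (hx y hy) hpy)
        have hcnt : t.countP p = 0 := by
          rw [List.countP_eq_zero]
          exact hall
        refine ⟨?_, ?_⟩
        · rw [List.filter_cons_of_neg (by simpa using hpx), List.countP_cons_of_neg (by simpa using hpx)]
          rw [hcnt]
          rw [List.filter_eq_nil_iff.mpr hall]
          rfl
        · intro j hj
          rw [List.countP_cons_of_neg (by simpa using hpx), hcnt]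
          cases j with
          | zero => simpa using hpx
          | succ j =>
              simp only [List.getElem_cons_succ]
              constructor
              · intro hp; exact absurd hp (hall _ (List.getElem_mem _))
              · omega

lemma pvShrink_eq (inst : List Int) (r : Int)
    (hpos : ∀ j : Nat, (hj : j < (pvOrd inst).length) →
      ((decide (r < pvGet inst ((pvOrd inst)[j]'hj)) : Bool) = true ↔
        j < (pvOrd inst).countP (fun i => decide (r < pvGet inst i)))) :
    ∀ k : Nat, (pvOrd inst).countP (fun i => decide (r < pvGet inst i)) ≤ k →
      k ≤ (pvOrd inst).length →
      pvShrink inst (pvOrd inst) r k = (pvOrd inst).countP (fun i => decide (r < pvGet inst i)) := by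
  intro k
  induction k with
  | zero =>
      intro h1 _
      rw [show pvShrink inst (pvOrd inst) r 0 = 0 from rfl]
      omega
  | succ k ih =>
      intro h1 h2
      have hk : k < (pvOrd inst).length := by omega
      have hidx : PySem.List.pyGetD (pvOrd inst) ((k : Nat) : Int) 0 = (pvOrd inst)[k] := by
        rw [PySem.List.pyGetD_eq_getElem _ _ (by positivity) (by exact_mod_cast hk)]
        simp
      unfold pvShrink
      rw [hidx]
      by_cases hc : (pvOrd inst).countP (fun i => decide (r < pvGet inst i)) ≤ k
      · have : ¬ (r < pvGet inst ((pvOrd inst)[k])) := by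
          intro hlt
          have := (hpos k hk).mp (by simpa using hlt)
          omega
        rw [if_pos (show PySem.List.pyGetD inst ((pvOrd inst)[k]) 0 ≤ r from not_lt.mp this)]
        exact ih hc (by omega)
      · have hkc : k < (pvOrd inst).countP (fun i => decide (r < pvGet inst i)) := by omega
        have hlt : r < pvGet inst ((pvOrd inst)[k]) := by
          have := (hpos k hk).mpr hkc
          simpa using this
        rw [if_neg (show ¬ PySem.List.pyGetD inst ((pvOrd inst)[k]) 0 ≤ r from not_le.mpr hlt)]
        omega

lemma pvOuterB (inst : List Int) : ∀ t : Nat,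
    ((PySem.List.pyRange 0 (t : Int) 1).foldl
      (fun (st : List Int × Nat) r =>
        let k := pvShrink inst (pvOrd inst) r st.2
        (st.1 ++ (pvOrd inst).take k, k))
      ([], (pvOrd inst).length)) = (pvC inst t, pvK inst t) := by
  intro t
  induction t with
  | zero =>
      rw [show ((0 : Nat) : Int) = 0 from rfl, pvRange_nil (le_refl 0), List.foldl_nil]
      rw [pvC_zero inst (le_refl 0)]
      rfl
  | succ t ih =>
      rw [show ((t + 1 : Nat) : Int) = (t : Int) + 1 by push_cast; ring]
      rw [PySem.List.pyRange_one_succ_right (by positivity), List.foldl_append, List.foldl_cons,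
        List.foldl_nil, ih]
      have hdc : ∀ a b : Int, pvGet inst b ≤ pvGet inst a →
          (fun i => decide ((t : Int) < pvGet inst i)) b = true →
          (fun i => decide ((t : Int) < pvGet inst i)) a = true := by
        intro a b hab hb
        simp only [decide_eq_true_eq] at *
        omega
      obtain ⟨hfil, hpos⟩ := pvDescPrefix inst _ hdc (pvOrd inst) (pvOrd_desc inst)
      have hle : (pvOrd inst).countP (fun i => decide ((t : Int) < pvGet inst i)) ≤ pvK inst t := by
        cases t with
        | zero => exact List.countP_le_length
        | succ s =>
            show _ ≤ (pvOrd inst).countP _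
            apply List.countP_mono_left
            intro i _ hi
            simp only [decide_eq_true_eq] at *
            push_cast at *
            omega
      have hklen : pvK inst t ≤ (pvOrd inst).length := by
        cases t with
        | zero => exact le_refl _
        | succ s => exact List.countP_le_length
      have hsh := pvShrink_eq inst (t : Int) hpos (pvK inst t) hle hklen
      show (pvC inst t ++ (pvOrd inst).take (pvShrink inst (pvOrd inst) (t : Int) (pvK inst t)),
      pvShrink inst (pvOrd inst) (t : Int) (pvK inst t)) = _
      rw [hsh, ← hfil, pvC_succ inst (t : Int) (by positivity)]
      rfl

lemma pvB_eq_C (inst : List Int) (m : Int)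
    (hm : PySem.List.max? inst (fun x => x) = some m) :
    sorted_1d_interdigitated_pattern_alt inst = pvC inst m := by
  unfold sorted_1d_interdigitated_pattern_alt
  rw [hm]
  show ((PySem.List.pyRange 0 m 1).foldl
      (fun (st : List Int × Nat) r =>
        let k := pvShrink inst (pvOrd inst) r st.2
        (st.1 ++ (pvOrd inst).take k, k))
      ([], (pvOrd inst).length)).1 = pvC inst m
  by_cases h0 : 0 ≤ m
  · have := pvOuterB inst m.toNat
    rw [Int.toNat_of_nonneg h0] at this
    rw [this]
  · rw [pvRange_nil (show m ≤ (0:Int) by omega), List.foldl_nil, pvC_zero inst (by omega)]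

-- ===== VERDICT (by name: the statement is the Claim_ definition above) =====
theorem sorted_1d_interdigitated_pattern_spec : Claim_equal_sorted_1d_interdigitated_pattern := by
  intro inst _ hpre
  show sorted_1d_interdigitated_pattern inst = sorted_1d_interdigitated_pattern_alt inst
  cases hm : PySem.List.max? inst (fun x => x) with
  | none =>
      simp [sorted_1d_interdigitated_pattern, sorted_1d_interdigitated_pattern_alt, hm]
  | some m =>
      rw [pvA_eq_C inst m hm, pvB_eq_C inst m hm]
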